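-- pv_equiv track=rewrite | github.com/zaydego1/DarwinGodelMachine | utils/git_utils.py | remove_patch_by_files
-- ===== SOURCE A (Python) =====
-- def remove_patch_by_files(patch_str, keyword='polyglot'):
--     """
--     Removes diff blocks related to files containing the keyword from a patch string.
--
--     Args:
--         patch_str (str): The complete patch text.
--         keyword (str): Keyword to match in filenames for removal (default: 'polyglot').
--
--     Returns:
--         str: A string containing the patch with diff blocks for matching files removed.
--     """
--     lines = patch_str.splitlines()
--     filtered_lines = []
--     include_block = True
--
--     for line in lines:
--         # When we encounter a new diff block header, check if the block contains the keyword
--         if line.startswith("diff --git"):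
--             include_block = keyword.lower() not in line.lower()
--         if include_block:
--             filtered_lines.append(line)
--
--     return "\n".join(filtered_lines)
-- ===== SOURCE B (Python) =====
-- def remove_patch_by_files(patch_str, keyword='polyglot'):
--     """Group the patch into blocks (preamble + one block per 'diff --git' header),
--     then filter out blocks whose header line contains the keyword, then rejoin."""
--     lines = patch_str.splitlines()
--     blocks = []
--     cur = []
--     for line in lines:
--         if line.startswith("diff --git") and cur:
--             blocks.append(cur)
--             cur = [line]
--         else:
--             cur.append(line)
--     if cur:
--         blocks.append(cur)
--     kw = keyword.lower()
--     kept = [b for b in blocks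
--             if not (b[0].startswith("diff --git") and kw in b[0].lower())]
--     return "\n".join(line for b in kept for line in b)
-- ===== Notes on version B (the rewrite author's own statement) =====
-- stated objective: alternative
-- what changed: A makes one pass carrying an include_block flag that decides each line individually; B first groups the lines into blocks (a preamble block plus one block per 'diff --git' header), then filters whole blocks by their header line, then flattens and joins.
import Mathlib
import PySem

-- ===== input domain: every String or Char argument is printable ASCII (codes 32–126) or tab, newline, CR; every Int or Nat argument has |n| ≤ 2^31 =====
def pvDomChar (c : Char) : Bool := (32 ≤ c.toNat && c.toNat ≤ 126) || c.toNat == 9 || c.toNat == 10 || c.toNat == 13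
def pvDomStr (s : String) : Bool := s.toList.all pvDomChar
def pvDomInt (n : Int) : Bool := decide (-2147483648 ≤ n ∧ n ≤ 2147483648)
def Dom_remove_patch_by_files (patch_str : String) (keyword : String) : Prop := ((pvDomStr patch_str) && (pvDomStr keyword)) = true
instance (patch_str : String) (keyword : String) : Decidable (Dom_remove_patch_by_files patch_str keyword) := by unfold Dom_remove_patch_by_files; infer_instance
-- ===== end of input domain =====

-- B regroups A's single flag-carrying pass into group-into-blocks / filter-blocks / flatten; alternative decomposition, same cost.

-- ===== PORT A =====
-- one pass; state = (filtered_lines, include_block)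
def remove_patch_by_files (patch_str : String) (keyword : String) : String :=
  let lines := PySem.Str.splitlines patch_str
  let st := lines.foldl (fun (s : List String × Bool) line =>
    let inc := if PySem.Str.startswith line "diff --git" then
                 !(PySem.Str.isIn (PySem.Str.lower keyword) (PySem.Str.lower line))
               else s.2
    (if inc then s.1 ++ [line] else s.1, inc)) ([], true)
  PySem.Str.join "\n" st.1

-- ===== PORT B =====
-- grouping pass; state = (blocks, cur).  b[0] is ported as b.headD "" (every block is nonempty).
def remove_patch_by_files_alt (patch_str : String) (keyword : String) : String :=
  let lines := PySem.Str.splitlines patch_str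
  let st := lines.foldl (fun (s : List (List String) × List String) line =>
    if PySem.Str.startswith line "diff --git" && !s.2.isEmpty then (s.1 ++ [s.2], [line])
    else (s.1, s.2 ++ [line])) ([], [])
  let blocks := if st.2.isEmpty then st.1 else st.1 ++ [st.2]
  let kw := PySem.Str.lower keyword
  let kept := blocks.filter (fun b =>
    !(PySem.Str.startswith (b.headD "") "diff --git" && PySem.Str.isIn kw (PySem.Str.lower (b.headD ""))))
  PySem.Str.join "\n" kept.flatten

-- ===== PRECONDITION & SPEC =====
def Spec_remove_patch_by_files (patch_str : String) (keyword : String) (out : String) : Prop := out = remove_patch_by_files_alt patch_str keyword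
instance (patch_str : String) (keyword : String) (out : String) : Decidable (Spec_remove_patch_by_files patch_str keyword out) := by unfold Spec_remove_patch_by_files; infer_instance

-- ===== CLAIM (what is proved, stated in full; the proofs are below) =====
def Claim_equal_remove_patch_by_files : Prop := ∀ (patch_str : String) (keyword : String), Dom_remove_patch_by_files patch_str keyword → Spec_remove_patch_by_files patch_str keyword (remove_patch_by_files patch_str keyword)

-- ===== LEMMAS AND PROOFS =====

-- generic per-line predicates: isH = "is a header line", kp = "keep the block whose head line is this";
-- hkp below says a non-header head line is always kept.
def pvKeepB (kp : String → Bool) (b : List String) : Bool := kp (b.headD "")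

def pvStepA (isH kp : String → Bool) (s : List String × Bool) (line : String) : List String × Bool :=
  let inc := if isH line then kp line else s.2
  (if inc then s.1 ++ [line] else s.1, inc)

def pvStepB (isH : String → Bool) (s : List (List String) × List String) (line : String) : List (List String) × List String :=
  if isH line && !s.2.isEmpty then (s.1 ++ [s.2], [line]) else (s.1, s.2 ++ [line])

def pvFinal (st : List (List String) × List String) : List (List String) :=
  if st.2.isEmpty then st.1 else st.1 ++ [st.2]

theorem pv_main (isH kp : String → Bool) (hkp : ∀ l, isH l = false → kp l = true) :
    ∀ (lines : List String) (bs : List (List String)) (cur acc : List String) (inc : Bool),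
    (cur = [] → inc = true) →
    (cur ≠ [] → inc = pvKeepB kp cur) →
    acc = ((bs.filter (pvKeepB kp)).flatten ++ (if cur.isEmpty then [] else if inc then cur else [])) →
    (lines.foldl (pvStepA isH kp) (acc, inc)).1 =
      (((pvFinal (lines.foldl (pvStepB isH) (bs, cur))).filter (pvKeepB kp)).flatten) := by
  intro lines
  induction lines with
  | nil =>
    intro bs cur acc inc _ hcons hacc
    cases cur with
    | nil => simp [pvFinal, hacc]
    | cons c cs =>
      have hinc := hcons (by simp)
      simp only [List.foldl_nil, pvFinal, List.isEmpty_cons, Bool.false_eq_true, if_false,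
        List.filter_append, List.flatten_append, hacc, hinc]
      rcases Bool.eq_false_or_eq_true (pvKeepB kp (c :: cs)) with h | h <;>
        simp [List.filter, h]
  | cons l rest ih =>
    intro bs cur acc inc hnil hcons hacc
    simp only [List.foldl_cons]
    by_cases hH : isH l = true
    · cases cur with
      | nil =>
        rw [show pvStepB isH (bs, ([] : List String)) l = (bs, [l]) by simp [pvStepB],
            show pvStepA isH kp (acc, inc) l = (if kp l then acc ++ [l] else acc, kp l) by
              simp [pvStepA, hH]]
        apply ih bs [l] _ (kp l) (by simp) (fun _ => by simp [pvKeepB])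
        rcases Bool.eq_false_or_eq_true (kp l) with h | h <;> simp [h, hacc]
      | cons c cs =>
        have hinc := hcons (by simp)
        rw [show pvStepB isH (bs, c :: cs) l = (bs ++ [c :: cs], [l]) by simp [pvStepB, hH],
            show pvStepA isH kp (acc, inc) l = (if kp l then acc ++ [l] else acc, kp l) by
              simp [pvStepA, hH]]
        apply ih (bs ++ [c :: cs]) [l] _ (kp l) (by simp) (fun _ => by simp [pvKeepB])
        simp only [List.filter_append, List.flatten_append, hacc, hinc]
        rcases Bool.eq_false_or_eq_true (pvKeepB kp (c :: cs)) with h | h <;>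
          rcases Bool.eq_false_or_eq_true (kp l) with h2 | h2 <;>
            simp [List.filter, h, h2]
    · have hH' : isH l = false := by simpa using hH
      cases cur with
      | nil =>
        have hinc := hnil rfl
        rw [show pvStepB isH (bs, ([] : List String)) l = (bs, [l]) by simp [pvStepB],
            show pvStepA isH kp (acc, inc) l = (acc ++ [l], inc) by
              simp [pvStepA, hH', hinc]]
        apply ih bs [l] _ inc (fun _ => hinc) (fun _ => by simp [pvKeepB, hkp l hH', hinc])
        simp [hacc, hinc]
      | cons c cs =>
        have hinc := hcons (by simp)
        rw [show pvStepB isH (bs, c :: cs) l = (bs, c :: cs ++ [l]) by simp [pvStepB, hH'],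
            show pvStepA isH kp (acc, inc) l = (if inc then acc ++ [l] else acc, inc) by
              simp [pvStepA, hH']]
        apply ih bs (c :: cs ++ [l]) _ inc (by simp) (fun _ => by simpa [pvKeepB] using hinc)
        rcases Bool.eq_false_or_eq_true inc with h | h <;> simp [hacc, h]

-- ===== VERDICT (by name: the statement is the Claim_ definition above) =====
theorem remove_patch_by_files_spec : Claim_equal_remove_patch_by_files := by
  intro patch_str keyword _
  unfold Spec_remove_patch_by_files remove_patch_by_files remove_patch_by_files_alt
  set isH : String → Bool := fun l => PySem.Str.startswith l "diff --git" with hisH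
  set kp : String → Bool := fun l =>
    !(isH l && PySem.Str.isIn (PySem.Str.lower keyword) (PySem.Str.lower l)) with hkp
  have hA : (fun (s : List String × Bool) line =>
      let inc := if PySem.Str.startswith line "diff --git" then
                   !(PySem.Str.isIn (PySem.Str.lower keyword) (PySem.Str.lower line))
                 else s.2
      (if inc then s.1 ++ [line] else s.1, inc)) = pvStepA isH kp := by
    funext s line
    cases hsw : PySem.Str.startswith line "diff --git" <;>
      simp only [pvStepA, hisH, hkp, hsw, Bool.true_and, Bool.false_and, Bool.not_false,
        if_true, if_false, Bool.false_eq_true]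
  have hB : (fun (s : List (List String) × List String) line =>
      if PySem.Str.startswith line "diff --git" && !s.2.isEmpty then (s.1 ++ [s.2], [line])
      else (s.1, s.2 ++ [line])) = pvStepB isH := by
    funext s line; simp only [pvStepB, hisH]
  have hF : (fun (b : List String) =>
      !(PySem.Str.startswith (b.headD "") "diff --git" &&
        PySem.Str.isIn (PySem.Str.lower keyword) (PySem.Str.lower (b.headD "")))) = pvKeepB kp := by
    funext b; simp only [pvKeepB, hkp, hisH]
  simp only [hA, hB, hF]
  congr 1
  have := pv_main isH kp (by intro l h; simp [hkp, h])
    (PySem.Str.splitlines patch_str) [] [] [] true (fun _ => rfl) (by simp) (by simp)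
  simpa [pvFinal] using this
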